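-- pv_equiv track=rewrite | github.com/pierre22400/mARCHCode | agents/agent_plan_validator.py | _dedup_str_list
-- ===== SOURCE A (Python) =====
-- from typing import Any, Dict, List, Optional, Tuple
--
-- def _dedup_str_list(values: Optional[List[str]]) -> List[str]:
--     """Déduplique une liste de chaînes en préservant l'ordre et en filtrant le vide."""
--     if not values:
--         return []
--     seen = set()
--     out: List[str] = []
--     for v in values:
--         s = str(v).strip()
--         if s and s not in seen:
--             seen.add(s)
--             out.append(s)
--     return out
-- ===== SOURCE B (Python) =====
-- def _dedup_str_list(values):
--     """Déduplique une liste de chaînes en préservant l'ordre et en filtrant le vide."""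
--     if not values:
--         return []
--
--     def go(xs):
--         # remove-duplicates-ahead recursion: emit the head's stripped form (if
--         # non-empty) and recurse on the tail with every later copy filtered out;
--         # no auxiliary 'seen' structure is maintained.
--         if not xs:
--             return []
--         s = str(xs[0]).strip()
--         rest = [x for x in xs[1:] if str(x).strip() != s]
--         return ([s] if s else []) + go(rest)
--
--     return go(list(values))
-- ===== Notes on version B (the rewrite author's own statement) =====
-- stated objective: alternative
-- what changed: Replaces A's single forward pass with a hand-maintained seen-set by a remove-duplicates-ahead recursion: emit the head's stripped value and recurse on the tail with all later occurrences of that value filtered out, keeping no membership structure at all.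
import Mathlib
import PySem

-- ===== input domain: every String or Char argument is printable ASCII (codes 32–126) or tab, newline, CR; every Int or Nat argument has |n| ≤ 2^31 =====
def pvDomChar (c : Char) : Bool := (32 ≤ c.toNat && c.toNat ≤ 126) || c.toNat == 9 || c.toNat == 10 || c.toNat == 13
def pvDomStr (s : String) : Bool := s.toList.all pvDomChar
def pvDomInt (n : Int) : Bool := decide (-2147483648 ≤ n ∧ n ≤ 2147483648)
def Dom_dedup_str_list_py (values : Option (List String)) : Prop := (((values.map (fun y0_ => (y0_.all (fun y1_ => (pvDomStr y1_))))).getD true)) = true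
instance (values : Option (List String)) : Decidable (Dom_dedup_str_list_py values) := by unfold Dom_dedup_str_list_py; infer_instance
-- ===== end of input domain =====

-- B replaces A's fused seen-set loop by a remove-duplicates-ahead recursion with no membership structure (alternative decomposition; same results).


-- ===== PORT A =====
-- Port of A: one fused loop over the list, maintaining a `seen` set and the output list.
def dedupStepA (st : PySem.Set String × List String) (v : String) : PySem.Set String × List String :=
  let s := PySem.Str.strip v
  if s ≠ "" ∧ st.1.contains s = false then (st.1.add s, st.2 ++ [s]) else st

def dedup_str_list_py (values : Option (List String)) : List String :=
  match values with
  | none => []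
  | some [] => []        -- Python's `if not values` is true for None and for the empty list
  | some vs => (vs.foldl dedupStepA (PySem.Set.empty, ([] : List String))).2

-- ===== PORT B =====
-- Port of B's `go`: remove-duplicates-ahead recursion; the stripped head is
-- emitted (if non-empty) and every later element with the same stripped form is filtered out.
def goB : List String → List String
  | [] => []
  | x :: xs =>
    (if PySem.Str.strip x ≠ "" then [PySem.Str.strip x] else []) ++
      goB (xs.filter (fun y => decide (PySem.Str.strip y ≠ PySem.Str.strip x)))
termination_by xs => xs.length
decreasing_by
  simp only [List.length_cons, List.length_unattach]
  exact Nat.lt_succ_of_le (le_trans (List.length_filter_le _ _) (by simp))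

def dedup_str_list_py_alt (values : Option (List String)) : List String :=
  match values with
  | some (v :: vs) => goB (v :: vs)      -- `if not values`: None and [] give []
  | _ => []

-- ===== PRECONDITION & SPEC =====
def Spec_dedup_str_list_py (values : Option (List String)) (out : List String) : Prop := out = dedup_str_list_py_alt values
instance (values : Option (List String)) (out : List String) : Decidable (Spec_dedup_str_list_py values out) := by unfold Spec_dedup_str_list_py; infer_instance

-- ===== CLAIM =====
def Claim_equal_dedup_str_list_py : Prop := ∀ (values : Option (List String)), Dom_dedup_str_list_py values → Spec_dedup_str_list_py values (dedup_str_list_py values)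

-- ===== LEMMAS AND PROOFS =====
-- the strip-and-filter view of one element (shared characterisation of the cleaned stream)
def cleanOneB (v : String) : Option String :=
  let s := PySem.Str.strip v
  if s ≠ "" then some s else none

-- Invariant of A's fused loop: started with seen = out = acc, its second component is the
-- Set.add-fold over the cleaned (stripped, non-empty) elements starting from acc.
theorem dedup_loop_eq (vs : List String) (acc : List String) :
    (vs.foldl dedupStepA (acc, acc)).2
      = (vs.filterMap cleanOneB).foldl PySem.Set.add acc := by
  induction vs generalizing acc with
  | nil => rfl
  | cons v vs ih =>
    by_cases hs : PySem.Str.strip v = ""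
    · have h1 : dedupStepA (acc, acc) v = (acc, acc) := by simp [dedupStepA, hs]
      have h2 : cleanOneB v = none := by simp [cleanOneB, hs]
      rw [List.foldl_cons, List.filterMap_cons, h1, h2]
      exact ih acc
    · have h2 : cleanOneB v = some (PySem.Str.strip v) := by simp [cleanOneB, hs]
      have h1 : dedupStepA (acc, acc) v
          = (PySem.Set.add acc (PySem.Str.strip v), PySem.Set.add acc (PySem.Str.strip v)) := by
        simp only [dedupStepA, PySem.Set.add, PySem.Set.contains, hs, ne_eq,
          not_false_iff, true_and, List.contains_eq_mem, decide_eq_false_iff_not]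
        split_ifs <;> simp_all
      rw [List.foldl_cons, List.filterMap_cons, h1, h2, List.foldl_cons]
      exact ih _

-- dropping the occurrences of an element already in the accumulator does not change the fold
theorem foldl_add_filter_mem (l : List String) (acc : List String) (c : String)
    (hc : c ∈ acc) :
    (l.filter (fun y => decide (y ≠ c))).foldl PySem.Set.add acc
      = l.foldl PySem.Set.add acc := by
  induction l generalizing acc with
  | nil => rfl
  | cons x xs ih =>
    by_cases hx : x = c
    · subst hx
      have : PySem.Set.add acc x = acc := PySem.Set.add_of_mem hc
      simp only [List.filter_cons, decide_eq_true_eq, ne_eq, not_true_eq_false,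
        if_false, List.foldl_cons, this]
      exact ih acc hc
    · simp only [List.filter_cons, ne_eq, hx, not_false_iff, decide_true, if_true,
        List.foldl_cons]
      exact ih _ (by rw [PySem.Set.mem_add]; exact Or.inl hc)

-- a fresh head of the accumulator is never touched when no element of l equals it
theorem foldl_add_cons (l : List String) (acc : List String) (c : String)
    (h : ∀ x ∈ l, x ≠ c) :
    l.foldl PySem.Set.add (c :: acc) = c :: l.foldl PySem.Set.add acc := by
  induction l generalizing acc with
  | nil => rfl
  | cons x xs ih =>
    have hx : x ≠ c := h x (List.mem_cons_self ..)
    have hstep : PySem.Set.add (c :: acc) x = c :: PySem.Set.add acc x := by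
      simp only [PySem.Set.add, PySem.Set.contains, List.contains_eq_mem,
        List.mem_cons, hx, false_or]
      split_ifs <;> simp
    rw [List.foldl_cons, hstep, List.foldl_cons]
    exact ih _ (fun y hy => h y (List.mem_cons_of_mem _ hy))

-- cleaning commutes with B's ahead-filter (for a non-empty stripped value s)
theorem filterMap_clean_filter (xs : List String) (s : String) (hs : s ≠ "") :
    ((xs.filter (fun y => decide (PySem.Str.strip y ≠ s))).filterMap cleanOneB)
      = (xs.filterMap cleanOneB).filter (fun y => decide (y ≠ s)) := by
  induction xs with
  | nil => rfl
  | cons x xs ih =>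
    by_cases hx : PySem.Str.strip x = ""
    · have h1 : cleanOneB x = none := by simp [cleanOneB, hx]
      have h2 : PySem.Str.strip x ≠ s := by rw [hx]; exact fun h => hs h.symm
      simpa [List.filter_cons, h1, h2] using ih
    · have h1 : cleanOneB x = some (PySem.Str.strip x) := by simp [cleanOneB, hx]
      by_cases he : PySem.Str.strip x = s
      · simpa [List.filter_cons, h1, he] using ih
      · simpa [List.filter_cons, h1, he] using ih

-- an empty stripped head: B's filter removes only elements that clean to none
theorem filterMap_clean_filter_empty (xs : List String) :
    ((xs.filter (fun y => decide (PySem.Str.strip y ≠ ""))).filterMap cleanOneB)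
      = xs.filterMap cleanOneB := by
  induction xs with
  | nil => rfl
  | cons x xs ih =>
    by_cases hx : PySem.Str.strip x = ""
    · have h1 : cleanOneB x = none := by simp [cleanOneB, hx]
      simpa [List.filter_cons, hx, h1] using ih
    · have h1 : cleanOneB x = some (PySem.Str.strip x) := by simp [cleanOneB, hx]
      simpa [List.filter_cons, hx, h1] using ih

-- main bridge: B's recursion computes the Set.add-fold over the cleaned stream
theorem goB_eq (xs : List String) :
    goB xs = (xs.filterMap cleanOneB).foldl PySem.Set.add [] := by
  induction hn : xs.length using Nat.strong_induction_on generalizing xs with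
  | _ n ih =>
    match xs, hn with
    | [], _ => simp [goB]
    | x :: xs, hn =>
      have hc : (x :: xs).length = xs.length + 1 := List.length_cons ..
      have hlen : ∀ (ys : List String), ys.length ≤ xs.length →
          goB ys = (ys.filterMap cleanOneB).foldl PySem.Set.add [] := by
        intro ys hys
        exact ih ys.length (by omega) ys rfl
      by_cases hs : PySem.Str.strip x = ""
      · have h1 : cleanOneB x = none := by simp [cleanOneB, hs]
        rw [goB.eq_def]
        simp only [hs, ne_eq, not_true_eq_false, if_false, List.nil_append,
          List.filterMap_cons, h1]
        rw [hlen _ (List.length_filter_le _ xs), filterMap_clean_filter_empty]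
      · have h1 : cleanOneB x = some (PySem.Str.strip x) := by simp [cleanOneB, hs]
        rw [goB.eq_def]
        simp only [hs, ne_eq, not_false_iff, if_true, List.singleton_append,
          List.filterMap_cons, h1]
        rw [hlen _ (List.length_filter_le _ xs), filterMap_clean_filter xs _ hs,
          List.foldl_cons]
        have hadd : PySem.Set.add ([] : List String) (PySem.Str.strip x)
            = [PySem.Str.strip x] := by rfl
        rw [hadd,
          ← foldl_add_filter_mem (xs.filterMap cleanOneB) [PySem.Str.strip x] _
            (List.mem_singleton_self _),
          foldl_add_cons _ [] _ (by
            intro y hy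
            rcases List.mem_filter.mp hy with ⟨_, hy2⟩
            simpa using hy2)]

-- ===== VERDICT =====
theorem dedup_str_list_py_spec : Claim_equal_dedup_str_list_py := by
  intro values _
  unfold Spec_dedup_str_list_py dedup_str_list_py dedup_str_list_py_alt
  match values with
  | none => rfl
  | some [] => rfl
  | some (v :: vs) =>
    simp only []
    rw [goB_eq]
    have h := dedup_loop_eq (v :: vs) []
    simpa [PySem.Set.empty] using h
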